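-- pv_equiv track=rewrite | github.com/rwstephenson/advent | 2023/dec15/dec15.py | updateBoxContents
-- ===== SOURCE A (Python) =====
-- def updateBoxContents(contents, lens, newFocal):
--     newContents = []
--     found = False
--     idxMax = 0
--     for boxLens in contents:
--         if boxLens[1] == lens:
--             newContents.append((boxLens[0],lens,newFocal))
--             found = True
--         else:
--             newContents.append(boxLens)
--             idxMax = max(boxLens[0],idxMax)
--     if found:
--         return newContents
--     else:
--         newContents.append((idxMax+1,lens,newFocal))
--         return newContents
-- ===== SOURCE B (Python) =====
-- def updateBoxContents(contents, lens, newFocal):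
--     if any(b[1] == lens for b in contents):
--         return [(b[0], lens, newFocal) if b[1] == lens else b for b in contents]
--     idxMax = max([0, *(b[0] for b in contents)])
--     return [*contents, (idxMax + 1, lens, newFocal)]
-- ===== Notes on version B (the rewrite author's own statement) =====
-- stated objective: simpler
-- what changed: Replaces A's single fused loop carrying (newContents, found, idxMax) state with a membership test followed by either a pure update map or a max pass plus append.
import Mathlib
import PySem

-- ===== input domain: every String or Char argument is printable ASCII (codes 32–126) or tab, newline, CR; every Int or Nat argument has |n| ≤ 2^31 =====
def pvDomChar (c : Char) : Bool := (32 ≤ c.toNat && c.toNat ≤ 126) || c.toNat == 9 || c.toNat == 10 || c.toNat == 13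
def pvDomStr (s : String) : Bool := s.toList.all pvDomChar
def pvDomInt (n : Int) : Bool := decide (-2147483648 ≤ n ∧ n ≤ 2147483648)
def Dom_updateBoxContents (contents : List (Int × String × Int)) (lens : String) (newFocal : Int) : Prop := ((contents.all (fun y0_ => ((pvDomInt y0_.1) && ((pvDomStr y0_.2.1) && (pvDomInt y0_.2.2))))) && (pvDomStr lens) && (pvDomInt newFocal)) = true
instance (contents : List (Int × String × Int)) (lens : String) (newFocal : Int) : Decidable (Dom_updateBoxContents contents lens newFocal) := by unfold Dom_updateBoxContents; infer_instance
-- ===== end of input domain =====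

-- B replaces A's single fused loop with (newContents, found, idxMax) state by a membership
-- test followed by either a pure update map or a separate max pass plus append (objective: simpler).

-- ===== PORT A =====
def updateBoxContents (contents : List (Int × String × Int)) (lens : String) (newFocal : Int) : List (Int × String × Int) :=
  let s := contents.foldl
    (fun (st : List (Int × String × Int) × Bool × Int) boxLens =>
      if boxLens.2.1 = lens then
        (st.1 ++ [(boxLens.1, lens, newFocal)], true, st.2.2)
      else
        (st.1 ++ [boxLens], st.2.1, max boxLens.1 st.2.2))
    ([], false, 0)
  if s.2.1 then s.1 else s.1 ++ [(s.2.2 + 1, lens, newFocal)]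

-- ===== PORT B =====
def updateBoxContents_alt (contents : List (Int × String × Int)) (lens : String) (newFocal : Int) : List (Int × String × Int) :=
  if contents.any (fun b => b.2.1 = lens) then
    contents.map (fun b => if b.2.1 = lens then (b.1, lens, newFocal) else b)
  else
    let idxMax := contents.foldl (fun m b => max m b.1) 0
    contents ++ [(idxMax + 1, lens, newFocal)]

-- ===== PRECONDITION & SPEC =====
def Spec_updateBoxContents (contents : List (Int × String × Int)) (lens : String) (newFocal : Int) (out : List (Int × String × Int)) : Prop := out = updateBoxContents_alt contents lens newFocal
instance (contents : List (Int × String × Int)) (lens : String) (newFocal : Int) (out : List (Int × String × Int)) : Decidable (Spec_updateBoxContents contents lens newFocal out) := by unfold Spec_updateBoxContents; infer_instance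

-- ===== CLAIM (what is proved, stated in full; the proofs are below) =====
def Claim_equal_updateBoxContents : Prop := ∀ (contents : List (Int × String × Int)) (lens : String) (newFocal : Int), Dom_updateBoxContents contents lens newFocal → Spec_updateBoxContents contents lens newFocal (updateBoxContents contents lens newFocal)

-- ===== LEMMAS AND PROOFS =====

-- A's loop state characterised component-wise, accumulator generalised.
theorem loop_fst (contents : List (Int × String × Int)) (lens : String) (newFocal : Int)
    (acc : List (Int × String × Int)) (f : Bool) (i : Int) :
    (contents.foldl
      (fun (st : List (Int × String × Int) × Bool × Int) boxLens =>
        if boxLens.2.1 = lens then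
          (st.1 ++ [(boxLens.1, lens, newFocal)], true, st.2.2)
        else
          (st.1 ++ [boxLens], st.2.1, max boxLens.1 st.2.2))
      (acc, f, i)).1
    = acc ++ contents.map (fun b => if b.2.1 = lens then (b.1, lens, newFocal) else b) := by
  induction contents generalizing acc f i with
  | nil => simp
  | cons hd tl ih => by_cases h : hd.2.1 = lens <;> simp [h, ih]

theorem loop_found (contents : List (Int × String × Int)) (lens : String) (newFocal : Int)
    (acc : List (Int × String × Int)) (f : Bool) (i : Int) :
    (contents.foldl
      (fun (st : List (Int × String × Int) × Bool × Int) boxLens =>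
        if boxLens.2.1 = lens then
          (st.1 ++ [(boxLens.1, lens, newFocal)], true, st.2.2)
        else
          (st.1 ++ [boxLens], st.2.1, max boxLens.1 st.2.2))
      (acc, f, i)).2.1
    = (f || contents.any (fun b => b.2.1 = lens)) := by
  induction contents generalizing acc f i with
  | nil => simp
  | cons hd tl ih =>
    by_cases h : hd.2.1 = lens <;> simp [h, ih]

theorem loop_idx (contents : List (Int × String × Int)) (lens : String) (newFocal : Int)
    (acc : List (Int × String × Int)) (f : Bool) (i : Int)
    (hno : contents.any (fun b => b.2.1 = lens) = false) :
    (contents.foldl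
      (fun (st : List (Int × String × Int) × Bool × Int) boxLens =>
        if boxLens.2.1 = lens then
          (st.1 ++ [(boxLens.1, lens, newFocal)], true, st.2.2)
        else
          (st.1 ++ [boxLens], st.2.1, max boxLens.1 st.2.2))
      (acc, f, i)).2.2
    = contents.foldl (fun m b => max m b.1) i := by
  induction contents generalizing acc f i with
  | nil => simp
  | cons hd tl ih =>
    simp only [List.any_cons, Bool.or_eq_false_iff] at hno
    have h1 := of_decide_eq_false hno.1
    simp [h1, ih _ _ _ hno.2, max_comm]

theorem map_no_match (contents : List (Int × String × Int)) (lens : String) (newFocal : Int)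
    (hno : contents.any (fun b => b.2.1 = lens) = false) :
    contents.map (fun b => if b.2.1 = lens then (b.1, lens, newFocal) else b) = contents := by
  induction contents with
  | nil => simp
  | cons hd tl ih =>
    simp only [List.any_cons, Bool.or_eq_false_iff] at hno
    have h1 := of_decide_eq_false hno.1
    simp [h1, ih hno.2]

-- ===== VERDICT (by name: the statement is the Claim_ definition above) =====
theorem updateBoxContents_spec : Claim_equal_updateBoxContents := by
  intro contents lens newFocal _
  unfold Spec_updateBoxContents updateBoxContents updateBoxContents_alt
  by_cases h : contents.any (fun b => b.2.1 = lens)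
  · simp [loop_found, loop_fst, h]
  · simp only [Bool.not_eq_true] at h
    simp [loop_found, loop_fst, loop_idx _ _ _ _ _ _ h, map_no_match _ _ newFocal h, h]
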